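-- pv_equiv track=rewrite | github.com/Costadoat/Informatique | TP/TP12 Dictionnaires/TPanagrammes-M-Péchaud/corranagrammes.py | sous_mot1
-- ===== SOURCE A (Python) =====
-- def mot_to_dico(m : str) -> dict:
--     '''renvoie le dictionnaire des nombres d'occurrences correspondant au mot m'''
--     d = {}
--     for e in m:
--         if e in d:
--             d[e] += 1
--         else:
--             d[e] = 1
--     return d
--
-- def sous_mot1(mot1 : str, mot2 : str) -> bool:
--     '''teste si mot1 est un sous-mot de mot2'''
--     d1 = mot_to_dico(mot1)
--     d2 = mot_to_dico(mot2)
--     for k in d1: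
--         if not k in d2:
--             return False
--         if d2[k] < d1[k]:
--             return False
--     return True
-- ===== SOURCE B (Python) =====
-- def sous_mot1(mot1: str, mot2: str) -> bool:
--     '''teste si mot1 est un sous-mot de mot2'''
--     need = {}
--     for c in mot1:
--         need[c] = need.get(c, 0) + 1
--     for c in mot2:
--         if need.get(c, 0) > 0:
--             need[c] -= 1
--     return all(v <= 0 for v in need.values())
-- ===== Notes on version B (the rewrite author's own statement) =====
-- stated objective: alternative
-- what changed: Instead of building occurrence dicts for both words and comparing them key by key, B builds one remaining-needs table from mot1, consumes it in a single pass over mot2 (decrementing positive entries), and returns whether every remaining need is <= 0.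
import Mathlib
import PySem

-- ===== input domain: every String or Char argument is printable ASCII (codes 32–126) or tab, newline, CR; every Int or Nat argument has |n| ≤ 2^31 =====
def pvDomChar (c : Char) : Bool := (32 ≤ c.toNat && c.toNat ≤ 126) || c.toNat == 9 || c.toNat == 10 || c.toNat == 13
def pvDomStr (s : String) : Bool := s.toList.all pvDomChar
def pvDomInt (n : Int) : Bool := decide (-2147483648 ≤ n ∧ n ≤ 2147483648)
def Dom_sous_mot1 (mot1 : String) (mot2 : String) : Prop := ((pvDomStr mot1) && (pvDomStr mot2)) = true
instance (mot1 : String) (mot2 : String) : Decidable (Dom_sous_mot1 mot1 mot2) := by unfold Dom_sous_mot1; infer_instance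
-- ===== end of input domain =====

-- B replaces A's two count-dicts and comparison loop by a single remaining-needs
-- table for mot1 that a one-pass consumption of mot2 decrements (objective: alternative).


-- ===== PORT A =====
def mot_to_dico (m : String) : PySem.Dict Char Int :=
  m.toList.foldl
    (fun d e => if d.contains e then d.modify e 0 (· + 1) else d.insert e 1)
    PySem.Dict.empty

-- the 'for k in d1: … return False …' loop, with its early returns
def sousLoopA (d1 d2 : PySem.Dict Char Int) : List Char → Bool
  | [] => true
  | k :: ks =>
      if !(d2.contains k) then false
      else if d2.getD k 0 < d1.getD k 0 then false   -- d2[k], d1[k]: k is a key of both here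
      else sousLoopA d1 d2 ks

def sous_mot1 (mot1 : String) (mot2 : String) : Bool :=
  let d1 := mot_to_dico mot1
  let d2 := mot_to_dico mot2
  sousLoopA d1 d2 d1.keys

-- ===== PORT B =====
def sous_mot1_alt (mot1 : String) (mot2 : String) : Bool :=
  let need0 := mot1.toList.foldl
    (fun d c => d.insert c (d.getD c 0 + 1)) (PySem.Dict.empty : PySem.Dict Char Int)
  let need := mot2.toList.foldl
    (fun d c => if d.getD c 0 > 0 then d.insert c (d.getD c 0 - 1) else d) need0
  need.values.all (fun v => decide (v ≤ 0))

-- ===== PRECONDITION & SPEC =====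
def Spec_sous_mot1 (mot1 : String) (mot2 : String) (out : Bool) : Prop := out = sous_mot1_alt mot1 mot2
instance (mot1 : String) (mot2 : String) (out : Bool) : Decidable (Spec_sous_mot1 mot1 mot2 out) := by unfold Spec_sous_mot1; infer_instance

-- ===== CLAIM (what is proved, stated in full; the proofs are below) =====
def Claim_equal_sous_mot1 : Prop := ∀ (mot1 : String) (mot2 : String), Dom_sous_mot1 mot1 mot2 → Spec_sous_mot1 mot1 mot2 (sous_mot1 mot1 mot2)

-- ===== LEMMAS AND PROOFS =====

-- A's occurrence dict is Counter(m)
theorem mot_to_dico_eq (m : String) : mot_to_dico m = PySem.Dict.counter m.toList := by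
  unfold mot_to_dico
  rw [PySem.Dict.counter_eq_foldl]
  congr 1
  funext d e
  by_cases h : d.contains e = true
  · simp [h]
  · simp only [Bool.not_eq_true] at h
    simp [h, PySem.Dict.modify, PySem.Dict.getD_of_not_contains d 0 h]

-- A's loop with early returns is an all over the keys
theorem sousLoopA_eq_all (d1 d2 : PySem.Dict Char Int) (ks : List Char) :
    sousLoopA d1 d2 ks = ks.all (fun k => d2.contains k && !(decide (d2.getD k 0 < d1.getD k 0))) := by
  induction ks with
  | nil => rfl
  | cons k ks ih =>
      simp only [sousLoopA, List.all_cons, ih]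
      by_cases h : d2.contains k = true
      · by_cases h2 : d2.getD k 0 < d1.getD k 0 <;> simp [h, h2]
      · simp only [Bool.not_eq_true] at h; simp [h]

-- B's consumption pass does not change the key list
theorem consume_keys (l : List Char) (d : PySem.Dict Char Int) :
    (l.foldl (fun d c => if d.getD c 0 > 0 then d.insert c (d.getD c 0 - 1) else d) d).keys
      = d.keys := by
  induction l generalizing d with
  | nil => rfl
  | cons x xs ih =>
      simp only [List.foldl_cons]
      by_cases h : d.getD x 0 > 0
      · have hc : d.contains x = true := by
          by_contra hc
          simp only [Bool.not_eq_true] at hc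
          rw [PySem.Dict.getD_of_not_contains d 0 hc] at h
          omega
        simp [h, ih, PySem.Dict.keys_insert_of_contains d _ hc]
      · simp [h, ih]

-- B's consumption pass, pointwise: remaining need after consuming l
theorem consume_getD (l : List Char) (d : PySem.Dict Char Int) (c : Char) :
    (l.foldl (fun d c => if d.getD c 0 > 0 then d.insert c (d.getD c 0 - 1) else d) d).getD c 0
      = max (d.getD c 0 - l.count c) (min (d.getD c 0) 0) := by
  induction l generalizing d with
  | nil => simp only [List.foldl_nil, List.count_nil]; omega
  | cons x xs ih =>
      simp only [List.foldl_cons]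
      by_cases h : d.getD x 0 > 0
      · rw [if_pos h, ih, PySem.Dict.getD_insert]
        by_cases hcx : c = x
        · subst hcx; simp only [if_pos, List.count_cons_self, Nat.cast_add, Nat.cast_one]; omega
        · simp [hcx, Ne.symm hcx]
      · rw [if_neg h, ih]
        by_cases hcx : c = x
        · subst hcx; simp only [List.count_cons_self, Nat.cast_add, Nat.cast_one]; omega
        · simp [Ne.symm hcx]

-- Bool all congruence on a list
theorem all_congr_mem {α : Type} {l : List α} {p q : α → Bool}
    (h : ∀ x ∈ l, p x = q x) : l.all p = l.all q := by
  induction l with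
  | nil => rfl
  | cons x xs ih =>
      simp only [List.all_cons, h x (by simp), ih (fun y hy => h y (by simp [hy]))]

theorem sous_mot1_eq_alt (mot1 mot2 : String) : sous_mot1 mot1 mot2 = sous_mot1_alt mot1 mot2 := by
  unfold sous_mot1 sous_mot1_alt
  rw [mot_to_dico_eq, mot_to_dico_eq, sousLoopA_eq_all]
  simp only [PySem.Dict.foldl_insert_getD_add_one_eq_counter]
  have hnd : (PySem.Dict.counter mot1.toList : PySem.Dict Char Int).keys.Nodup :=
    PySem.Dict.nodup_keys_counter _
  have hkeys := consume_keys mot2.toList (PySem.Dict.counter mot1.toList)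
  have hnd' : ((mot2.toList.foldl
      (fun d c => if d.getD c 0 > 0 then d.insert c (d.getD c 0 - 1) else d)
      (PySem.Dict.counter mot1.toList)).keys).Nodup := by rw [hkeys]; exact hnd
  rw [PySem.Dict.values_eq_map_keys _ hnd' 0, hkeys, List.all_map]
  apply all_congr_mem
  intro k hk
  have hk1 : k ∈ mot1.toList := by
    rw [PySem.Dict.keys_counter] at hk
    exact (PySem.Set.mem_ofList _ _).mp hk
  have hc1 : 0 < mot1.toList.count k := List.count_pos_iff.mpr hk1
  simp only [Function.comp, consume_getD, PySem.Dict.getD_counter,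
    PySem.Dict.contains_counter, List.contains_eq_mem]
  have hmax : max ((mot1.toList.count k : Int) - mot2.toList.count k)
      (min (mot1.toList.count k : Int) 0) ≤ 0
      ↔ (mot1.toList.count k : Int) ≤ (mot2.toList.count k : Int) := by omega
  by_cases hle : (mot1.toList.count k : Int) ≤ (mot2.toList.count k : Int)
  · have hk2 : k ∈ mot2.toList := List.count_pos_iff.mp (by omega)
    simp [hk2, not_lt.mpr hle]
    omega
  · have h2 : ¬ (max ((mot1.toList.count k : Int) - mot2.toList.count k)
        (min (mot1.toList.count k : Int) 0) ≤ 0) := fun h => hle (hmax.mp h)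
    rw [decide_eq_false h2]
    simp [show (mot2.toList.count k : Int) < (mot1.toList.count k : Int) from by omega]

-- ===== VERDICT (by name: the statement is the Claim_ definition above) =====
theorem sous_mot1_spec : Claim_equal_sous_mot1 := by
  intro mot1 mot2 _
  exact sous_mot1_eq_alt mot1 mot2
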